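-- pv_equiv track=rewrite | github.com/rao1140427950/Digital_Image_Processing | transforms.py | calcHadamard
-- ===== SOURCE A (Python) =====
-- def calcHadamard(i, j):
--     temp = i&j
--     result = 0
--
--     for k in range(32):
--         result = result + (temp >> k) & 1
--     if (result % 2 == 0):
--         return 1
--     else:
--         return -1
-- ===== SOURCE B (Python) =====
-- def calcHadamard(i, j):
--     t = (i & j) & 0xFFFFFFFF
--     t ^= t >> 16
--     t ^= t >> 8
--     t ^= t >> 4
--     t ^= t >> 2
--     t ^= t >> 1
--     return 1 if t & 1 == 0 else -1
-- ===== Notes on version B (the rewrite author's own statement) =====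
-- stated objective: faster
-- what changed: Replaces the 32-iteration bit-by-bit parity accumulation over i&j with a 5-step XOR-folding (divide-and-conquer) parity reduction of the masked 32-bit value.
import Mathlib
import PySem

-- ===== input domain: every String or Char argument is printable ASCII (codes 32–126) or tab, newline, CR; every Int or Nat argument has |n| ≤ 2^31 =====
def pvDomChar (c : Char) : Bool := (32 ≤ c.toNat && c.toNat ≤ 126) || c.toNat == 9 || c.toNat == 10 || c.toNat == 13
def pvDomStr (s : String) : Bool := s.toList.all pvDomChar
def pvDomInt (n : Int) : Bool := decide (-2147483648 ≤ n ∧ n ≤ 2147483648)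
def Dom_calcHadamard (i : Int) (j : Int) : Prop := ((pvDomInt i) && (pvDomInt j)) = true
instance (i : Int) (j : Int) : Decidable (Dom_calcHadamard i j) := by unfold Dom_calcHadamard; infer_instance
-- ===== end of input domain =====

-- B replaces A's 32-iteration bit-by-bit parity loop by a 5-step XOR-fold of the masked
-- 32-bit value (fewer operations per call; return values proved identical for all inputs).

-- ===== PORT A =====
-- 'result = result + (temp >> k) & 1' parses as '(result + (temp >> k)) & 1' in Python.
-- k ranges over 0..31 so 'k.toNat' is exact for the shift amount.
def calcHadamard (i : Int) (j : Int) : Int :=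
  let temp := PySem.Int.band i j
  let result : Int := 0
  let result := (PySem.List.pyRange 0 32 1).foldl
    (fun result k => PySem.Int.band (result + (temp >>> k.toNat)) 1) result
  if PySem.Int.mod result 2 = 0 then 1 else -1

-- ===== PORT B =====
def calcHadamard_alt (i : Int) (j : Int) : Int :=
  let t := PySem.Int.band (PySem.Int.band i j) 4294967295
  let t := PySem.Int.bxor t (t >>> (16 : Nat))
  let t := PySem.Int.bxor t (t >>> (8 : Nat))
  let t := PySem.Int.bxor t (t >>> (4 : Nat))
  let t := PySem.Int.bxor t (t >>> (2 : Nat))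
  let t := PySem.Int.bxor t (t >>> (1 : Nat))
  if PySem.Int.band t 1 = 0 then 1 else -1

-- ===== PRECONDITION & SPEC =====
def Spec_calcHadamard (i : Int) (j : Int) (out : Int) : Prop := out = calcHadamard_alt i j
instance (i : Int) (j : Int) (out : Int) : Decidable (Spec_calcHadamard i j out) := by unfold Spec_calcHadamard; infer_instance

-- ===== CLAIM (what is proved, stated in full; the proofs are below) =====
def Claim_equal_calcHadamard : Prop := ∀ (i : Int) (j : Int), Dom_calcHadamard i j → Spec_calcHadamard i j (calcHadamard i j)

-- ===== LEMMAS AND PROOFS =====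

-- parity of the low W bits of n
def bitP (n W : Nat) : Nat := (((List.range W).map (fun k => (n >>> k) % 2)).sum) % 2

lemma sum_mod_two (l : List Nat) : l.sum % 2 = (l.map (· % 2)).sum % 2 := by
  induction l with
  | nil => rfl
  | cons a l ih =>
    simp only [List.sum_cons, List.map_cons]
    omega

lemma bitP_one (x : Nat) : bitP x 1 = x % 2 := by
  simp [bitP]

lemma shift_mod_two (x k : Nat) : (x >>> k) % 2 = (x.testBit k).toNat := by
  rcases h : x.testBit k with _ | _ <;> simp_all [Nat.testBit]

lemma xor_shift_mod (x y k : Nat) :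
    ((x ^^^ y) >>> k) % 2 = ((x >>> k) % 2 + (y >>> k) % 2) % 2 := by
  rw [shift_mod_two, shift_mod_two, shift_mod_two, Nat.testBit_xor]
  rcases x.testBit k <;> rcases y.testBit k <;> simp

lemma bitP_fold (x w : Nat) : bitP (x ^^^ (x >>> w)) w = bitP x (w + w) := by
  unfold bitP
  rw [List.range_add]
  simp only [List.map_append, List.map_map, List.sum_append, Function.comp_def]
  have h1 : (List.range w).map (fun k => ((x ^^^ x >>> w) >>> k) % 2)
      = (List.range w).map (fun k => ((x >>> k) % 2 + (x >>> (w + k)) % 2) % 2) :=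
    List.map_congr_left (fun k _ => by rw [xor_shift_mod, Nat.shiftRight_add])
  rw [h1]
  rw [show ((List.range w).map (fun k => ((x >>> k) % 2 + (x >>> (w + k)) % 2) % 2))
      = ((List.range w).map (fun k => (x >>> k) % 2 + (x >>> (w + k)) % 2)).map (· % 2) from by
    rw [List.map_map]; rfl]
  rw [← sum_mod_two, List.sum_map_add]

-- the masking step: x & 0xFFFFFFFF is x mod 2^32
lemma band_mask (m : Int) : PySem.Int.band m 4294967295 = m % 4294967296 := by
  unfold PySem.Int.band
  by_cases hm : 0 ≤ m
  · simp only [hm, if_true, show (0:Int) ≤ 4294967295 by norm_num, if_true]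
    have h1 : m.toNat &&& (4294967295:Int).toNat = m.toNat % 4294967296 := by
      have : (4294967295:Int).toNat = 2 ^ 32 - 1 := rfl
      rw [this, Nat.and_two_pow_sub_one_eq_mod]
    rw [h1]
    omega
  · simp only [hm, if_false, show (0:Int) ≤ 4294967295 by norm_num, if_true]
    have h1 : (4294967295:Int).toNat &&& (-m - 1).toNat = (-m - 1).toNat % 4294967296 := by
      have h2 : (4294967295:Int).toNat = 2 ^ 32 - 1 := rfl
      rw [h2, Nat.and_comm, Nat.and_two_pow_sub_one_eq_mod]
    rw [h1]
    have h3 : (-m - 1).toNat % 4294967296 < 4294967296 := Nat.mod_lt _ (by norm_num)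
    have h4 : ((-m - 1).toNat : Int) = -m - 1 := by omega
    have h5 : ((-m - 1).toNat % 4294967296 : Nat) = ((-m - 1).toNat : Int) % 4294967296 := by
      omega
    omega

-- low bits of m agree with low bits of m % 2^32
lemma shift_emod_two (m : Int) (k : Nat) (hk : k < 32) :
    (m >>> k) % 2 = ((m % 4294967296) >>> k) % 2 := by
  have h1 : (2:Int) ^ k * 2 ^ (32 - k) = 4294967296 := by
    have hk32 : k + (32 - k) = 32 := by omega
    rw [← pow_add, hk32]
    norm_num
  have hq : m = m % 4294967296 + 2 ^ k * (2 ^ (32 - k) * (m / 4294967296)) := by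
    rw [← mul_assoc, h1]
    omega
  rw [Int.shiftRight_eq_div_pow, Int.shiftRight_eq_div_pow]
  push_cast
  conv_lhs => rw [hq]
  rw [Int.add_mul_ediv_left _ _ (by positivity : ((2:Int) ^ k : Int) ≠ 0)]
  have h2 : (2:Int) ∣ 2 ^ (32 - k) := dvd_pow_self 2 (by omega)
  obtain ⟨c, hc⟩ := h2
  rw [hc]
  rw [mul_assoc, Int.add_mul_emod_self_left]

-- A's loop body over a list of shift amounts < 32, tracked against the Nat computation on n
lemma fold_corr (m : Int) (n : Nat) (hn : (n : Int) = m % 4294967296) :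
    ∀ (l : List Nat), (∀ k ∈ l, k < 32) → ∀ (r : Nat),
    List.foldl (fun (r : Int) (k : Nat) => PySem.Int.band (r + (m >>> k)) 1) (↑(r % 2)) l
      = ↑(List.foldl (fun (r : Nat) (k : Nat) => (r + (n >>> k)) % 2) (r % 2) l) := by
  intro l
  induction l with
  | nil => intro _ r; rfl
  | cons a l ih =>
    intro hl r
    have ha : a < 32 := hl a (List.mem_cons_self)
    have step : PySem.Int.band (↑(r % 2) + (m >>> a)) 1 = ↑((r % 2 + n >>> a) % 2) := by
      rw [PySem.Int.band_one, PySem.Int.mod_eq_emod_of_pos (by norm_num)]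
      have h1 : (↑(r % 2) + m >>> a) % 2 = (↑(r % 2) + (↑n : Int) >>> a) % 2 := by
        have h2 := shift_emod_two m a ha
        rw [hn]
        omega
      rw [h1]
      have h3 : ((↑n : Int) >>> a) = ((n >>> a : Nat) : Int) := rfl
      rw [h3]
      push_cast
      omega
    simp only [List.foldl_cons, step]
    exact ih (fun k hk => hl k (List.mem_cons_of_mem a hk)) (r % 2 + n >>> a)

lemma foldmod (g : Nat → Nat) : ∀ (l : List Nat) (r : Nat),
    List.foldl (fun (r k : Nat) => (r + g k) % 2) (r % 2) l = (r + (l.map g).sum) % 2 := by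
  intro l
  induction l with
  | nil => intro r; simp
  | cons a l ih =>
    intro r
    simp only [List.foldl_cons, List.map_cons, List.sum_cons]
    have h1 : (r % 2 + g a) % 2 = (r + g a) % 2 := by omega
    rw [h1, ih (r + g a)]
    omega

-- A's Nat-level parity equals bitP n 32
lemma foldA_eq_bitP (n : Nat) :
    List.foldl (fun (r k : Nat) => (r + (n >>> k)) % 2) 0 (List.range 32) = bitP n 32 := by
  have h0 : (0 : Nat) = 0 % 2 := rfl
  rw [h0, foldmod (fun k => n >>> k) (List.range 32) 0]
  unfold bitP
  rw [Nat.zero_add, sum_mod_two ((List.range 32).map (fun k => n >>> k)), List.map_map]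
  rfl

-- the five-step XOR fold computes bitP n 32 in its low bit
lemma xorfold_parity (n : Nat) :
    (((((n ^^^ n >>> 16) ^^^ (n ^^^ n >>> 16) >>> 8)
        ^^^ ((n ^^^ n >>> 16) ^^^ (n ^^^ n >>> 16) >>> 8) >>> 4)
        ^^^ (((n ^^^ n >>> 16) ^^^ (n ^^^ n >>> 16) >>> 8)
        ^^^ ((n ^^^ n >>> 16) ^^^ (n ^^^ n >>> 16) >>> 8) >>> 4) >>> 2)
        ^^^ ((((n ^^^ n >>> 16) ^^^ (n ^^^ n >>> 16) >>> 8)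
        ^^^ ((n ^^^ n >>> 16) ^^^ (n ^^^ n >>> 16) >>> 8) >>> 4)
        ^^^ (((n ^^^ n >>> 16) ^^^ (n ^^^ n >>> 16) >>> 8)
        ^^^ ((n ^^^ n >>> 16) ^^^ (n ^^^ n >>> 16) >>> 8) >>> 4) >>> 2) >>> 1) % 2
      = bitP n 32 := by
  rw [← bitP_one]
  rw [bitP_fold, bitP_fold, bitP_fold, bitP_fold, bitP_fold]

-- ===== VERDICT (by name: the statement is the Claim_ definition above) =====
theorem calcHadamard_spec : Claim_equal_calcHadamard := by
  intro i j _
  unfold Spec_calcHadamard calcHadamard calcHadamard_alt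
  dsimp only
  set m := PySem.Int.band i j with hm
  set n : Nat := (m % 4294967296).toNat with hn
  have hmod : (0:Int) ≤ m % 4294967296 := Int.emod_nonneg m (by norm_num)
  have hncast : (n : Int) = m % 4294967296 := by omega
  -- B side: reduce to the Nat computation
  have hmask : PySem.Int.band m 4294967295 = (n : Int) := by rw [band_mask, hncast]
  have hshift : ∀ (x k : Nat), ((x : Int) >>> k) = ((x >>> k : Nat) : Int) := fun _ _ => rfl
  rw [hmask]
  rw [hshift, PySem.Int.bxor_natCast, hshift, PySem.Int.bxor_natCast, hshift,
      PySem.Int.bxor_natCast, hshift, PySem.Int.bxor_natCast, hshift, PySem.Int.bxor_natCast]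
  -- A side: reduce the pyRange fold to the Nat fold
  have hrange : PySem.List.pyRange 0 32 1 = (List.range 32).map (fun k : Nat => (k : Int)) := by
    rw [PySem.List.pyRange_one]
    simp
  rw [hrange, List.foldl_map]
  have hfoldA :
      List.foldl (fun (result : Int) (k : Nat) =>
          PySem.Int.band (result + (m >>> ((((k : Int)).toNat : Int)))) 1) 0 (List.range 32)
        = ↑(List.foldl (fun (r k : Nat) => (r + (n >>> k)) % 2) 0 (List.range 32)) := by
    have h1 : (fun (result : Int) (k : Nat) =>
          PySem.Int.band (result + (m >>> ((((k : Int)).toNat : Int)))) 1)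
        = (fun (result : Int) (k : Nat) => PySem.Int.band (result + (m >>> k)) 1) := by
      funext r k
      rw [Int.toNat_natCast, Int.shiftRight_natCast_right]
    rw [h1]
    have h2 : (0 : Int) = ((0 % 2 : Nat) : Int) := rfl
    rw [h2, fold_corr m n hncast (List.range 32) (fun k hk => List.mem_range.mp hk) 0]
  rw [hfoldA, foldA_eq_bitP]
  -- both conditions are now the same Nat parity
  have hA : PySem.Int.mod ((bitP n 32 : Nat) : Int) 2 = ((bitP n 32 : Nat) : Int) := by
    rw [PySem.Int.mod_eq_emod_of_pos (by norm_num)]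
    have : bitP n 32 < 2 := by unfold bitP; omega
    omega
  have hB : ∀ (x : Nat), PySem.Int.band ((x : Nat) : Int) 1 = ((x % 2 : Nat) : Int) := by
    intro x
    have h1 : ((1:Int)) = ((1:Nat) : Int) := rfl
    rw [h1, PySem.Int.band_natCast, Nat.and_one_is_mod]
  rw [hA, hB, xorfold_parity]
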